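-- pv_equiv track=rewrite | github.com/Yangl1492/510_final_p | new_data_producer.py | encode_zone
-- ===== SOURCE A (Python) =====
-- ENCODE_MAPPING ={
--     9: 0, 10: 1, 11: 2,
--     12: 3, 13: 4, 14: 5,
--     15: 6, 16: 7, 17: 8,
--     27: 9, 28: 10, 29: 11, 30: 12, 31: 13,
--     32: 14, 33: 15,
-- }
--
-- def encode_zone(cards):
--     card_counts = [0] * 16  # Initialize counts for 16 possible values
--     for card in cards:
--         if card != -1:  # Ignore cards with value -1
--             # Determine the mapping index from the card value or the card itself
--             if hasattr(card, 'value'):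
--                 card_value = card.value
--             else:
--                 card_value = card
--
--             if card_value in ENCODE_MAPPING:
--                 encode_index = ENCODE_MAPPING[card_value]
--                 card_counts[encode_index] += 1  # Increment the count at the encoded index
--
--     return card_counts  # Return the counts
-- ===== SOURCE B (Python) =====
-- ENCODE_MAPPING = {
--     9: 0, 10: 1, 11: 2,
--     12: 3, 13: 4, 14: 5,
--     15: 6, 16: 7, 17: 8,
--     27: 9, 28: 10, 29: 11, 30: 12, 31: 13,
--     32: 14, 33: 15,
-- }
--
-- def encode_zone(cards):
--     # Per-bucket counting: for each of the 16 mapping keys (in index order),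
--     # count that key's occurrences in cards.  No histogram is built and no -1
--     # test is needed: -1 is never a mapping key, and cards that map to no key
--     # are simply never counted.
--     return [cards.count(key) for key in ENCODE_MAPPING]
-- ===== Notes on version B (the rewrite author's own statement) =====
-- stated objective: alternative
-- what changed: A makes one pass over the cards writing increments into a 16-slot array via the ENCODE_MAPPING lookup; B makes no histogram pass at all: it iterates over the 16 mapping keys and computes each output slot directly as cards.count(key), dropping the -1 and membership tests entirely.
import Mathlib
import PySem

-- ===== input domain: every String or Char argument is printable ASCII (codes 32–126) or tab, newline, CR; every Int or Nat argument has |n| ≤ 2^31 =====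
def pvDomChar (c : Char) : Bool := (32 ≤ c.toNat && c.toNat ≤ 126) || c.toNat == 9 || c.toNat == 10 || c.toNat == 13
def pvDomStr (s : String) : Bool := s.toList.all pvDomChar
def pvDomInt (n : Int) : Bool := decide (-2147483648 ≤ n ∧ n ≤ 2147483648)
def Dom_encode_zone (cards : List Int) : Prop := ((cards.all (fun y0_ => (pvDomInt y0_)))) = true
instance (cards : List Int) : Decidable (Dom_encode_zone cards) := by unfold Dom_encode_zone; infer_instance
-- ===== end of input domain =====

-- B drops A's single-pass histogram-array write loop: it computes each of the 16 output
-- slots directly as cards.count(key) over the mapping keys (objective: alternative).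

-- ===== PORT A =====
-- ENCODE_MAPPING (module-level dict literal)
def pvMap : PySem.Dict Int Int :=
  PySem.Dict.mk [(9, 0), (10, 1), (11, 2), (12, 3), (13, 4), (14, 5), (15, 6), (16, 7),
                 (17, 8), (27, 9), (28, 10), (29, 11), (30, 12), (31, 13), (32, 14), (33, 15)]

-- one iteration of A's 'for card in cards' loop (card_value = card: an int has no .value).
-- 'card_counts[encode_index] += 1': the index is always 0..15 and the list always has
-- length 16, so List.set / List.getD are exact here (Python never raises IndexError).
def pvStepA (st : List Int) (card : Int) : List Int :=
  if card ≠ -1 then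
    match pvMap.get? card with
    | some i => st.set i.toNat (st.getD i.toNat 0 + 1)
    | none => st
  else st

def encode_zone (cards : List Int) : List Int :=
  cards.foldl pvStepA (List.replicate 16 0)

-- ===== PORT B =====
-- the keys of ENCODE_MAPPING in insertion (= index) order
def pvKeys : List Int := [9, 10, 11, 12, 13, 14, 15, 16, 17, 27, 28, 29, 30, 31, 32, 33]

-- '[cards.count(key) for key in ENCODE_MAPPING]'
def encode_zone_alt (cards : List Int) : List Int :=
  pvKeys.map (fun key => (PySem.List.count cards key : Int))

-- ===== PRECONDITION & SPEC =====
def Spec_encode_zone (cards : List Int) (out : List Int) : Prop := out = encode_zone_alt cards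
instance (cards : List Int) (out : List Int) : Decidable (Spec_encode_zone cards out) := by unfold Spec_encode_zone; infer_instance

-- ===== CLAIM (what is proved, stated in full; the proofs are below) =====
def Claim_equal_encode_zone : Prop := ∀ (cards : List Int), Dom_encode_zone cards → Spec_encode_zone cards (encode_zone cards)

-- ===== LEMMAS AND PROOFS =====

-- every value the mapping can return lies in [0, 16)
theorem pvMap_range (c i : Int) (h : pvMap.get? c = some i) : 0 ≤ i ∧ i < 16 := by
  have hm := PySem.Dict.mem_items_of_get?_eq_some pvMap h
  simp only [pvMap, List.mem_cons, List.not_mem_nil, Prod.mk.injEq, or_false] at hm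
  omega

-- A's loop preserves the array length
theorem lenA (cards : List Int) (st : List Int) :
    (cards.foldl pvStepA st).length = st.length := by
  induction cards generalizing st with
  | nil => rfl
  | cons c cs ih =>
      rw [List.foldl_cons, ih]
      unfold pvStepA
      split_ifs with h
      · cases hm : pvMap.get? c <;> simp
      · rfl

-- the index A increments for card c, as an Option Nat
def pvIdx? (c : Int) : Option Nat :=
  if c = -1 then none else (pvMap.get? c).map Int.toNat

-- 'A increments slot j on card c' iff c ↦ j is one of the 16 mapping entries
theorem idx_mem (c : Int) (j : Nat) :
    pvIdx? c = some j ↔ (c ≠ -1 ∧ (c, (j : Int)) ∈ pvMap.items) := by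
  constructor
  · intro h
    unfold pvIdx? at h
    by_cases hc : c = -1
    · simp [hc] at h
    · cases hm : pvMap.get? c with
      | none => simp [hc, hm] at h
      | some i =>
          simp [hc, hm] at h
          have hr := pvMap_range c i hm
          have : i = (j : Int) := by omega
          subst this
          exact ⟨hc, PySem.Dict.mem_items_of_get?_eq_some pvMap hm⟩
  · rintro ⟨hc, hmem⟩
    have hnd : pvMap.keys.Nodup := by decide
    have := PySem.Dict.get?_of_mem_items pvMap hmem hnd
    simp [pvIdx?, hc, this]

-- invariant of A's loop: slot j accumulates the number of cards whose index is j
theorem A_inv (cards : List Int) (st : List Int) (hlen : st.length = 16)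
    (j : Nat) (hj : j < 16) :
    (cards.foldl pvStepA st).getD j 0
      = st.getD j 0 + ((cards.filter (fun c => pvIdx? c = some j)).length : Int) := by
  induction cards generalizing st with
  | nil => simp
  | cons c cs ih =>
      rw [List.foldl_cons]
      have hlen' : (pvStepA st c).length = 16 := by
        unfold pvStepA
        split_ifs with h
        · cases hm : pvMap.get? c <;> simp [hlen]
        · exact hlen
      rw [ih _ hlen']
      have hstep : (pvStepA st c).getD j 0
          = st.getD j 0 + (if pvIdx? c = some j then (1 : Int) else 0) := by
        by_cases h : c = -1
        · simp [pvStepA, pvIdx?, h]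
        · cases hm : pvMap.get? c with
          | none => simp [pvStepA, pvIdx?, h, hm]
          | some i =>
              have hr := pvMap_range c i hm
              have hstepA : pvStepA st c = st.set i.toNat (st.getD i.toNat 0 + 1) := by
                simp [pvStepA, h, hm]
              by_cases hij : i.toNat = j
              · have hif : pvIdx? c = some j := by simp [pvIdx?, h, hm, hij]
                subst hij
                simp [hstepA, hif, List.getD_eq_getElem?_getD, hlen,
                      show i.toNat < 16 by omega]
              · have hif : ¬ pvIdx? c = some j := by simp [pvIdx?, h, hm, hij]
                simp [hstepA, hif, List.getD_eq_getElem?_getD, hij]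
      rw [hstep]
      by_cases hc : pvIdx? c = some j <;> simp [hc] <;> ring

-- once the slot's key k is known, A's per-slot tally equals cards.count k
theorem perslot (cards : List Int) (j : Nat) (k : Int)
    (hiff : ∀ c, pvIdx? c = some j ↔ c = k) :
    ((cards.filter (fun c => pvIdx? c = some j)).length : Int)
      = (cards.count k : Int) := by
  have h1 : cards.filter (fun c => pvIdx? c = some j)
      = cards.filter (fun c => c = k) :=
    List.filter_congr (fun c _ => by simp [hiff c])
  rw [h1]
  congr 1
  rw [List.count_eq_countP, ← List.countP_eq_length_filter]
  apply List.countP_congr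
  intro c _
  simp

-- ===== VERDICT (by name: the statement is the Claim_ definition above) =====
theorem encode_zone_spec : Claim_equal_encode_zone := by
  intro cards _
  show List.foldl pvStepA (List.replicate 16 0) cards
      = pvKeys.map (fun key => (PySem.List.count cards key : Int))
  apply List.ext_getElem
  · rw [lenA]; simp [pvKeys]
  · intro j hj1 hj2
    have hj : j < 16 := by simpa [lenA] using hj1
    have hjk : j < pvKeys.length := by simpa [pvKeys] using hj
    rw [← List.getD_eq_getElem _ 0 hj1,
        A_inv cards (List.replicate 16 0) (by simp) j hj,
        show (List.replicate 16 (0 : Int)).getD j 0 = 0 by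
          rw [List.getD_eq_getElem _ 0 (by simpa using hj)]
          interval_cases j <;> rfl,
        zero_add, List.getElem_map, PySem.List.count_eq]
    apply perslot cards j pvKeys[j]
    intro c
    rw [idx_mem c j]
    unfold pvKeys at *
    interval_cases j <;>
      (simp only [pvMap, List.mem_cons, List.not_mem_nil, Prod.mk.injEq,
                  List.getElem_cons_zero, List.getElem_cons_succ]; norm_num; omega)
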